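-- pv_equiv track=rewrite | github.com/ramanuja-5194/AI-Fashion-Design-Assistant | models/fashion_recommender.py | styles_compatible
-- ===== SOURCE A (Python) =====
-- from typing import Dict, List, Tuple
--
-- def styles_compatible(styles1: List[str], styles2: List[str]) -> bool:
--     """Check if two style lists are compatible"""
--     # Define compatible style groups
--     compatible_groups = [
--         ['casual', 'streetwear', 'modern'],
--         ['formal', 'classic', 'elegant', 'minimalist'],
--         ['bohemian', 'romantic', 'vintage'],
--         ['edgy', 'modern', 'avant-garde'],
--     ]
--
--     for group in compatible_groups:
--         if any(style in group for style in styles1) and any(style in group for style in styles2):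
--             return True
--
--     return len(set(styles1).intersection(set(styles2))) > 0
-- ===== SOURCE B (Python) =====
-- def styles_compatible(styles1, styles2):
--     """Check if two style lists are compatible (inverted-index formulation)."""
--     compatible_groups = [
--         ['casual', 'streetwear', 'modern'],
--         ['formal', 'classic', 'elegant', 'minimalist'],
--         ['bohemian', 'romantic', 'vintage'],
--         ['edgy', 'modern', 'avant-garde'],
--     ]
--     index = {}
--     for i, group in enumerate(compatible_groups):
--         for style in group:
--             index.setdefault(style, set()).add(i)
--     g1 = set()
--     for s in styles1:
--         g1 |= index.get(s, set())
--     g2 = set()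
--     for s in styles2:
--         g2 |= index.get(s, set())
--     if g1 & g2:
--         return True
--     return bool(set(styles1) & set(styles2))
-- ===== Notes on version B (the rewrite author's own statement) =====
-- stated objective: alternative
-- what changed: B builds an inverted index mapping each style to the set of compatible-group indices, unions the index hits over each input list and tests the two index-sets for a common group, instead of A's loop over the four groups scanning both input lists per group; the direct set-intersection fallback is kept.
import Mathlib
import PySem

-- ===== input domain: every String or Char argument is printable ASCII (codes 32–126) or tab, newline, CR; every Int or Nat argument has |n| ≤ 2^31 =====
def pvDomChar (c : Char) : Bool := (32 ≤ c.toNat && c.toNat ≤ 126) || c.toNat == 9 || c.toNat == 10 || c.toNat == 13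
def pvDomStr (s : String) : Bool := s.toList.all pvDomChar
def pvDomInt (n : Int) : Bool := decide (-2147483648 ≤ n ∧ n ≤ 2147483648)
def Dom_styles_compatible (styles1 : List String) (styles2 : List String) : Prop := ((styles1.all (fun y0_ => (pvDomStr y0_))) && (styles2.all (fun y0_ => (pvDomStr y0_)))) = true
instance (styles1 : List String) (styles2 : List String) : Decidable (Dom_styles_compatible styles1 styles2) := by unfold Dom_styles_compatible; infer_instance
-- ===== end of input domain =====

-- B replaces A's per-group scans by an inverted index (style -> set of group indices) built once,
-- unioning index hits over each input list; objective: alternative decomposition, same result.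

-- ===== PORT A =====
-- A's loop 'for group in compatible_groups: if any(...) and any(...): return True', then the fallback.
def pvALoop (styles1 : List String) (styles2 : List String) : List (List String) → Bool
  | [] => decide (0 < PySem.Set.len (PySem.Set.inter (PySem.Set.ofList styles1) (PySem.Set.ofList styles2)))
  | g :: rest =>
    if (styles1.any (fun style => g.contains style)) && (styles2.any (fun style => g.contains style)) then
      true
    else
      pvALoop styles1 styles2 rest

def styles_compatible (styles1 : List String) (styles2 : List String) : Bool :=
  pvALoop styles1 styles2
    [["casual", "streetwear", "modern"],
     ["formal", "classic", "elegant", "minimalist"],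
     ["bohemian", "romantic", "vintage"],
     ["edgy", "modern", "avant-garde"]]

-- ===== PORT B =====
def pvBGroups : List (List String) :=
  [["casual", "streetwear", "modern"],
   ["formal", "classic", "elegant", "minimalist"],
   ["bohemian", "romantic", "vintage"],
   ["edgy", "modern", "avant-garde"]]

-- index = {}; for i, group in enumerate(groups): for style in group: index.setdefault(style, set()).add(i)
def pvBIndex : PySem.Dict String (PySem.Set Int) :=
  (PySem.List.enumerate pvBGroups).foldl
    (fun d p =>
      p.2.foldl (fun d style => d.insert style (PySem.Set.add (d.getD style PySem.Set.empty) p.1)) d)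
    PySem.Dict.empty

-- g = set(); for s in styles: g |= index.get(s, set())
def pvGather (styles : List String) : PySem.Set Int :=
  styles.foldl (fun acc s => PySem.Set.union acc (pvBIndex.getD s PySem.Set.empty)) PySem.Set.empty

def styles_compatible_alt (styles1 : List String) (styles2 : List String) : Bool :=
  let g1 := pvGather styles1
  let g2 := pvGather styles2
  if !(PySem.Set.inter g1 g2).isEmpty then
    true
  else
    !(PySem.Set.inter (PySem.Set.ofList styles1) (PySem.Set.ofList styles2)).isEmpty

-- ===== PRECONDITION & SPEC =====
def Spec_styles_compatible (styles1 : List String) (styles2 : List String) (out : Bool) : Prop := out = styles_compatible_alt styles1 styles2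
instance (styles1 : List String) (styles2 : List String) (out : Bool) : Decidable (Spec_styles_compatible styles1 styles2 out) := by unfold Spec_styles_compatible; infer_instance

-- ===== CLAIM (what is proved, stated in full; the proofs are below) =====
def Claim_equal_styles_compatible : Prop := ∀ (styles1 : List String) (styles2 : List String), Dom_styles_compatible styles1 styles2 → Spec_styles_compatible styles1 styles2 (styles_compatible styles1 styles2)

-- ===== LEMMAS AND PROOFS =====

-- B's index, once built, as a literal dict.
set_option maxHeartbeats 2000000 in
lemma pvBIndex_eq : pvBIndex = PySem.Dict.mk
    [("casual", [0]), ("streetwear", [0]), ("modern", [0, 3]), ("formal", [1]),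
     ("classic", [1]), ("elegant", [1]), ("minimalist", [1]), ("bohemian", [2]),
     ("romantic", [2]), ("vintage", [2]), ("edgy", [3]), ("avant-garde", [3])] := by
  decide

-- i is an index-set hit for s exactly when group i contains s.
set_option maxHeartbeats 1000000 in
lemma mem_pvBIndex (i : Int) (s : String) :
    i ∈ PySem.Dict.getD pvBIndex s PySem.Set.empty ↔
      ((i = 0 ∧ s ∈ (["casual", "streetwear", "modern"] : List String)) ∨
       (i = 1 ∧ s ∈ (["formal", "classic", "elegant", "minimalist"] : List String)) ∨
       (i = 2 ∧ s ∈ (["bohemian", "romantic", "vintage"] : List String)) ∨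
       (i = 3 ∧ s ∈ (["edgy", "modern", "avant-garde"] : List String))) := by
  rw [pvBIndex_eq, PySem.Dict.getD_eq_get?_getD]
  simp only [PySem.Dict.get?_mk_cons, beq_iff_eq, List.mem_cons, List.not_mem_nil, or_false]
  by_cases h0 : "casual" = s
  · subst h0; simp; try omega
  by_cases h1 : "streetwear" = s
  · subst h1; simp; try omega
  by_cases h2 : "modern" = s
  · subst h2; simp; try omega
  by_cases h3 : "formal" = s
  · subst h3; simp; try omega
  by_cases h4 : "classic" = s
  · subst h4; simp; try omega
  by_cases h5 : "elegant" = s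
  · subst h5; simp; try omega
  by_cases h6 : "minimalist" = s
  · subst h6; simp; try omega
  by_cases h7 : "bohemian" = s
  · subst h7; simp; try omega
  by_cases h8 : "romantic" = s
  · subst h8; simp; try omega
  by_cases h9 : "vintage" = s
  · subst h9; simp; try omega
  by_cases h10 : "edgy" = s
  · subst h10; simp; try omega
  by_cases h11 : "avant-garde" = s
  · subst h11; simp; try omega
  simp only [if_neg h0, if_neg h1, if_neg h2, if_neg h3, if_neg h4, if_neg h5, if_neg h6, if_neg h7, if_neg h8, if_neg h9, if_neg h10, if_neg h11]
  constructor
  · intro h; exact absurd h (List.not_mem_nil)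
  · rintro (⟨_, rfl | rfl | rfl⟩ | ⟨_, rfl | rfl | rfl | rfl⟩ | ⟨_, rfl | rfl | rfl⟩ | ⟨_, rfl | rfl | rfl⟩) <;> simp_all

lemma mem_foldl_union (i : Int) (l : List String) (acc : PySem.Set Int) :
    i ∈ l.foldl (fun a s => PySem.Set.union a (pvBIndex.getD s PySem.Set.empty)) acc ↔
      i ∈ acc ∨ ∃ s ∈ l, i ∈ PySem.Dict.getD pvBIndex s PySem.Set.empty := by
  induction l generalizing acc with
  | nil => simp
  | cons x xs ih =>
    rw [List.foldl_cons, ih]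
    simp only [PySem.Set.mem_union, List.exists_mem_cons_iff]
    tauto

lemma mem_pvGather (i : Int) (l : List String) :
    i ∈ pvGather l ↔ ∃ s ∈ l, i ∈ PySem.Dict.getD pvBIndex s PySem.Set.empty := by
  rw [pvGather, mem_foldl_union]; simp

lemma A_true_iff (s1 s2 : List String) :
    styles_compatible s1 s2 = true ↔
      ((∃ s ∈ s1, s ∈ (["casual", "streetwear", "modern"] : List String)) ∧
        (∃ s ∈ s2, s ∈ (["casual", "streetwear", "modern"] : List String))) ∨
      ((∃ s ∈ s1, s ∈ (["formal", "classic", "elegant", "minimalist"] : List String)) ∧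
        (∃ s ∈ s2, s ∈ (["formal", "classic", "elegant", "minimalist"] : List String))) ∨
      ((∃ s ∈ s1, s ∈ (["bohemian", "romantic", "vintage"] : List String)) ∧
        (∃ s ∈ s2, s ∈ (["bohemian", "romantic", "vintage"] : List String))) ∨
      ((∃ s ∈ s1, s ∈ (["edgy", "modern", "avant-garde"] : List String)) ∧
        (∃ s ∈ s2, s ∈ (["edgy", "modern", "avant-garde"] : List String))) ∨
      (∃ s ∈ s1, s ∈ s2) := by
  simp only [styles_compatible, pvALoop]
  split_ifs with c1 c2 c3 c4 <;>
    simp_all [List.any_eq_true, PySem.Set.len]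
  constructor
  · intro h
    obtain ⟨x, hx⟩ := List.exists_mem_of_length_pos h
    have hx' := (PySem.Set.mem_inter _ _ _).mp hx
    exact Or.inr (Or.inr (Or.inr (Or.inr ⟨x, (PySem.Set.mem_ofList _ _).mp hx'.1,
      (PySem.Set.mem_ofList _ _).mp hx'.2⟩)))
  · rintro (⟨⟨a, ha, hpa⟩, ⟨b, hb, hpb⟩⟩ | ⟨⟨a, ha, hpa⟩, ⟨b, hb, hpb⟩⟩ |
      ⟨⟨a, ha, hpa⟩, ⟨b, hb, hpb⟩⟩ | ⟨⟨a, ha, hpa⟩, ⟨b, hb, hpb⟩⟩ | ⟨x, hx1, hx2⟩)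
    · exact absurd hpb (by have := c1 a ha hpa b hb; tauto)
    · exact absurd hpb (by have := c2 a ha hpa b hb; tauto)
    · exact absurd hpb (by have := c3 a ha hpa b hb; tauto)
    · exact absurd hpb (by have := c4 a ha hpa b hb; tauto)
    · exact List.length_pos_of_mem
        ((PySem.Set.mem_inter _ _ _).mpr ⟨(PySem.Set.mem_ofList _ _).mpr hx1, (PySem.Set.mem_ofList _ _).mpr hx2⟩)

lemma B_true_iff (s1 s2 : List String) :
    styles_compatible_alt s1 s2 = true ↔
      (∃ i : Int, i ∈ pvGather s1 ∧ i ∈ pvGather s2) ∨ (∃ s ∈ s1, s ∈ s2) := by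
  cases h : (PySem.Set.inter (pvGather s1) (pvGather s2)).isEmpty with
  | false =>
    simp only [styles_compatible_alt, h, Bool.not_false, if_true, true_iff]
    obtain ⟨x, hx⟩ := List.isEmpty_eq_false_iff_exists_mem.mp h
    exact Or.inl ⟨x, (PySem.Set.mem_inter _ _ _).mp hx⟩
  | true =>
    have hno : ∀ i : Int, ¬(i ∈ pvGather s1 ∧ i ∈ pvGather s2) := by
      intro i hi
      have hm : i ∈ PySem.Set.inter (pvGather s1) (pvGather s2) := (PySem.Set.mem_inter _ _ _).mpr hi
      rw [List.isEmpty_iff] at h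
      rw [h] at hm
      exact absurd hm (List.not_mem_nil)
    simp only [styles_compatible_alt, h, Bool.not_true, Bool.false_eq_true, if_false,
      Bool.not_eq_true']
    constructor
    · intro hb
      obtain ⟨x, hx⟩ := List.isEmpty_eq_false_iff_exists_mem.mp hb
      have hx' := (PySem.Set.mem_inter _ _ _).mp hx
      exact Or.inr ⟨x, (PySem.Set.mem_ofList _ _).mp hx'.1, (PySem.Set.mem_ofList _ _).mp hx'.2⟩
    · rintro (⟨i, hi⟩ | ⟨x, hx1, hx2⟩)
      · exact absurd hi (hno i)
      · have hm : x ∈ PySem.Set.inter (PySem.Set.ofList s1) (PySem.Set.ofList s2) :=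
          (PySem.Set.mem_inter _ _ _).mpr ⟨(PySem.Set.mem_ofList _ _).mpr hx1,
            (PySem.Set.mem_ofList _ _).mpr hx2⟩
        exact List.isEmpty_eq_false_iff_exists_mem.mpr ⟨x, hm⟩

-- ===== VERDICT (by name: the statement is the Claim_ definition above) =====
theorem styles_compatible_spec : Claim_equal_styles_compatible := by
  intro s1 s2 _
  unfold Spec_styles_compatible
  rw [Bool.eq_iff_iff, A_true_iff, B_true_iff]
  simp only [mem_pvGather, mem_pvBIndex]
  constructor
  · rintro (⟨⟨a, ha, hpa⟩, ⟨b, hb, hpb⟩⟩ | ⟨⟨a, ha, hpa⟩, ⟨b, hb, hpb⟩⟩ |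
      ⟨⟨a, ha, hpa⟩, ⟨b, hb, hpb⟩⟩ | ⟨⟨a, ha, hpa⟩, ⟨b, hb, hpb⟩⟩ | h)
    · exact Or.inl ⟨0, ⟨a, ha, Or.inl ⟨rfl, hpa⟩⟩, ⟨b, hb, Or.inl ⟨rfl, hpb⟩⟩⟩
    · exact Or.inl ⟨1, ⟨a, ha, Or.inr (Or.inl ⟨rfl, hpa⟩)⟩, ⟨b, hb, Or.inr (Or.inl ⟨rfl, hpb⟩)⟩⟩
    · exact Or.inl ⟨2, ⟨a, ha, Or.inr (Or.inr (Or.inl ⟨rfl, hpa⟩))⟩, ⟨b, hb, Or.inr (Or.inr (Or.inl ⟨rfl, hpb⟩))⟩⟩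
    · exact Or.inl ⟨3, ⟨a, ha, Or.inr (Or.inr (Or.inr ⟨rfl, hpa⟩))⟩, ⟨b, hb, Or.inr (Or.inr (Or.inr ⟨rfl, hpb⟩))⟩⟩
    · exact Or.inr h
  · rintro (⟨i, ⟨a, ha, hA⟩, ⟨b, hb, hB⟩⟩ | h)
    · rcases hA with ⟨hi, hma⟩ | ⟨hi, hma⟩ | ⟨hi, hma⟩ | ⟨hi, hma⟩ <;>
        rcases hB with ⟨hi', hmb⟩ | ⟨hi', hmb⟩ | ⟨hi', hmb⟩ | ⟨hi', hmb⟩ <;>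
        first
          | (exfalso; omega)
          | exact Or.inl ⟨⟨a, ha, hma⟩, ⟨b, hb, hmb⟩⟩
          | exact Or.inr (Or.inl ⟨⟨a, ha, hma⟩, ⟨b, hb, hmb⟩⟩)
          | exact Or.inr (Or.inr (Or.inl ⟨⟨a, ha, hma⟩, ⟨b, hb, hmb⟩⟩))
          | exact Or.inr (Or.inr (Or.inr (Or.inl ⟨⟨a, ha, hma⟩, ⟨b, hb, hmb⟩⟩)))
    · exact Or.inr (Or.inr (Or.inr (Or.inr h)))
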